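-- pv_equiv track=rewrite | github.com/Brettillian123/email-scraper-verifier | scripts/demo_autodiscovery.py | _looks_like_title
-- ===== SOURCE A (Python) =====
-- def _looks_like_title(text: str) -> bool:
--     """
--     Very loose heuristic for job titles.
--     """
--     t = text.strip()
--     if not t:
--         return False
--     if "@" in t:
--         return False
--     # Common leadership words
--     keywords = [
--         "CEO",
--         "CFO",
--         "COO",
--         "CTO",
--         "Chief",
--         "President",
--         "VP",
--         "Vice President",
--         "Founder",
--         "Co-founder",
--         "Head",
--         "Director",
--         "Manager",
--         "Lead",
--         "Advisor",
--     ]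
--     return any(k.lower() in t.lower() for k in keywords)
-- ===== SOURCE B (Python) =====
-- _KEYWORDS = (
--     "ceo", "cfo", "coo", "cto", "chief", "president", "vp",
--     "vice president", "founder", "co-founder", "head", "director",
--     "manager", "lead", "advisor",
-- )
--
--
-- def _looks_like_title(text: str) -> bool:
--     """
--     Very loose heuristic for job titles: one left-to-right scan of the
--     lowered text, checking at each position whether a keyword starts there.
--     """
--     t = text.strip()
--     if not t:
--         return False
--     if "@" in t:
--         return False
--     low = t.lower()
--     for i in range(len(low)):
--         if any(low.startswith(k, i) for k in _KEYWORDS):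
--             return True
--     return False
-- ===== Notes on version B (the rewrite author's own statement) =====
-- stated objective: alternative
-- what changed: Instead of testing each keyword with a separate substring search over the lowered text, B lowers the text once and makes a single left-to-right scan, checking at each position whether any (pre-lowered) keyword starts there.
import Mathlib
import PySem

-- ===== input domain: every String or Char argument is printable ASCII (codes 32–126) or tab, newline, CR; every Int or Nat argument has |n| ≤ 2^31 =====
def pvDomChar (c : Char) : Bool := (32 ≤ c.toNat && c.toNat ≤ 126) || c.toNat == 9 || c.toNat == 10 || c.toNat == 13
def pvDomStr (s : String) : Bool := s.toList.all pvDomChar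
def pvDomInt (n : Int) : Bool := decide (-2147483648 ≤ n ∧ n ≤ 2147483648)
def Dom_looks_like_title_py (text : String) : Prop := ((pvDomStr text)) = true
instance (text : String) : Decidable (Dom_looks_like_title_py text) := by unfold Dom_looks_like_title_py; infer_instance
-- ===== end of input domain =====

-- B replaces per-keyword substring searches by a single left-to-right scan of the
-- lowered text that checks at each position whether any pre-lowered keyword starts
-- there (objective: alternative; same result, not claimed faster).

-- ===== PORT A =====
def pvKeywordsA : List String :=
  ["CEO", "CFO", "COO", "CTO", "Chief", "President", "VP", "Vice President",
   "Founder", "Co-founder", "Head", "Director", "Manager", "Lead", "Advisor"]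

def looks_like_title_py (text : String) : Bool :=
  let t := PySem.Str.strip text
  if PySem.Str.len t = 0 then false
  else if PySem.Str.isIn "@" t then false
  else pvKeywordsA.any (fun k => PySem.Str.isIn (PySem.Str.lower k) (PySem.Str.lower t))

-- ===== PORT B =====
def pvKeywordsB : List (List Char) :=
  ["ceo".toList, "cfo".toList, "coo".toList, "cto".toList, "chief".toList,
   "president".toList, "vp".toList, "vice president".toList, "founder".toList,
   "co-founder".toList, "head".toList, "director".toList, "manager".toList,
   "lead".toList, "advisor".toList]

-- the 'for i in range(len(low))' scan: at each position, does some keyword start there?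
def pvScan : List Char → Bool
  | [] => false
  | c :: rest =>
      if pvKeywordsB.any (fun k => PySem.Chars.startswith (c :: rest) k) then true
      else pvScan rest

def looks_like_title_py_alt (text : String) : Bool :=
  let t := PySem.Str.strip text
  if PySem.Str.len t = 0 then false
  else if PySem.Str.isIn "@" t then false
  else pvScan (PySem.Chars.lower (PySem.Str.strip text).toList)

-- ===== PRECONDITION & SPEC =====
def Spec_looks_like_title_py (text : String) (out : Bool) : Prop := out = looks_like_title_py_alt text
instance (text : String) (out : Bool) : Decidable (Spec_looks_like_title_py text out) := by unfold Spec_looks_like_title_py; infer_instance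

-- ===== CLAIM (what is proved, stated in full; the proofs are below) =====
def Claim_equal_looks_like_title_py : Prop := ∀ (text : String), Dom_looks_like_title_py text → Spec_looks_like_title_py text (looks_like_title_py text)


-- ===== LEMMAS AND PROOFS =====

theorem pvAnyCongr {α : Type} (l : List α) (f g : α → Bool)
    (h : ∀ x ∈ l, f x = g x) : l.any f = l.any g := by
  induction l with
  | nil => rfl
  | cons a t ih => simp_all [List.any_cons]

theorem pvKeywordsB_nonempty : ∀ k ∈ pvKeywordsB, k ≠ [] := by decide

-- the scan finds a keyword iff some keyword is an infix (every keyword is nonempty)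
theorem pvScan_eq_any_isIn (l : List Char) :
    pvScan l = pvKeywordsB.any (fun k => PySem.Chars.isIn k l) := by
  induction l with
  | nil =>
      symm
      rw [pvScan]
      refine List.any_eq_false.mpr (fun k hk => ?_)
      simp [PySem.Chars.isIn_iff_infix, List.infix_nil, pvKeywordsB_nonempty k hk]
  | cons c rest ih =>
      rw [pvScan, ih]
      by_cases h : pvKeywordsB.any (fun k => PySem.Chars.startswith (c :: rest) k) = true
      · rw [if_pos h]
        rcases List.any_eq_true.mp h with ⟨k, hk, hpre⟩
        symm
        refine List.any_eq_true.mpr ⟨k, hk, ?_⟩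
        rw [PySem.Chars.isIn_iff_infix]
        exact ((PySem.Chars.startswith_iff _ _).mp hpre).isInfix
      · rw [if_neg h]
        refine pvAnyCongr _ _ _ (fun k hk => ?_)
        have hnp : ¬ k <+: c :: rest := fun hpre =>
          h (List.any_eq_true.mpr ⟨k, hk, (PySem.Chars.startswith_iff _ _).mpr hpre⟩)
        refine Bool.eq_iff_iff.mpr ?_
        rw [PySem.Chars.isIn_iff_infix, PySem.Chars.isIn_iff_infix, List.infix_cons_iff]
        exact (or_iff_right hnp).symm

theorem pvKeywordsB_eq_map :
    pvKeywordsB = pvKeywordsA.map (fun k => PySem.Chars.lower k.toList) := by decide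

-- ===== VERDICT (by name: the statement is the Claim_ definition above) =====
theorem looks_like_title_py_spec : Claim_equal_looks_like_title_py := by
  intro text _
  unfold Spec_looks_like_title_py looks_like_title_py looks_like_title_py_alt
  dsimp only
  split_ifs
  · rfl
  · rfl
  · rw [pvScan_eq_any_isIn, pvKeywordsB_eq_map, List.any_map]
    refine pvAnyCongr _ _ _ (fun k hk => ?_)
    simp [PySem.Str.isIn, Function.comp]
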